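-- pv_equiv track=rewrite | github.com/benab04/Facility-Layout-Design | main.py | rel_chart_to_aldep_matrix
-- ===== SOURCE A (Python) =====
-- from typing import Dict, List, Optional, Tuple
--
-- def rel_chart_to_aldep_matrix(rel_chart: List[List[str]]) -> List[List[str]]:
--     """Diagonal '-' -> 'U' for ALDEP (letters only)."""
--     n = len(rel_chart)
--     out: List[List[str]] = []
--     for i in range(n):
--         row = []
--         for j in range(n):
--             row.append(rel_chart[i][j] if i != j else "U")
--         out.append(row)
--     return out
-- ===== SOURCE B (Python) =====
-- from typing import List
--
-- def rel_chart_to_aldep_matrix(rel_chart: List[List[str]]) -> List[List[str]]: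
--     """Diagonal '-' -> 'U' for ALDEP (letters only)."""
--     n = len(rel_chart)
--     return [row[:i] + ["U"] + row[i + 1:n] for i, row in enumerate(rel_chart)]
-- ===== Notes on version B (the rewrite author's own statement) =====
-- stated objective: simpler
-- what changed: Replaces A's doubly-nested index loop with a per-cell conditional by a single enumerate pass that assembles each output row by splicing: row[:i] + ['U'] + row[i+1:n]; there is no inner loop and no per-cell branch.
import Mathlib
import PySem

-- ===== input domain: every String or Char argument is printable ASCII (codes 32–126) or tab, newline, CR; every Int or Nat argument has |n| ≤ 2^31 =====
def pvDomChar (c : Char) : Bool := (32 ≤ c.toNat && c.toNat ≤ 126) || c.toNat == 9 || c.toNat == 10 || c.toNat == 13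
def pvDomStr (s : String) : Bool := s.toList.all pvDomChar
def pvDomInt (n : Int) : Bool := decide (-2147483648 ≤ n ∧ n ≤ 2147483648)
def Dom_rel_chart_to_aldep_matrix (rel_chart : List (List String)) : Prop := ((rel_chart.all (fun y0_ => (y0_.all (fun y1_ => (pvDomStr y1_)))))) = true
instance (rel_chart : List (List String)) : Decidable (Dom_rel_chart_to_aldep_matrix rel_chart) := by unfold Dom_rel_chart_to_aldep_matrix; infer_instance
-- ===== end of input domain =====

-- B builds each output row in one enumerate pass by splicing row[:i] + ["U"] + row[i+1:n],
-- instead of A's nested index loops with a per-cell conditional; same cost, simpler.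

-- ===== PORT A =====
def rel_chart_to_aldep_matrix (rel_chart : List (List String)) : List (List String) :=
  let n : Int := rel_chart.length
  (PySem.List.pyRange 0 n 1).foldl (fun out i =>
    out ++ [(PySem.List.pyRange 0 n 1).foldl (fun row j =>
      row ++ [if i ≠ j then PySem.List.pyGetD (PySem.List.pyGetD rel_chart i []) j "" else "U"]) []]) []

-- ===== PORT B =====
def rel_chart_to_aldep_matrix_alt (rel_chart : List (List String)) : List (List String) :=
  let n : Int := rel_chart.length
  (PySem.List.enumerate rel_chart).map (fun p =>
    PySem.List.slice p.2 none (some p.1) ++ ["U"] ++ PySem.List.slice p.2 (some (p.1 + 1)) (some n))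

-- ===== PRECONDITION & SPEC =====
-- Pre_ excludes exactly the ragged charts on which A raises IndexError: some row i shorter
-- than the column indices A reads there (all j < n except j = i, so the last row may be
-- short by one). A returns on every input of Pre_.
def Pre_rel_chart_to_aldep_matrix (rel_chart : List (List String)) : Prop :=
  ∀ i < rel_chart.length,
    (if i + 1 = rel_chart.length then rel_chart.length - 1 else rel_chart.length)
      ≤ (rel_chart.getD i []).length
instance (rel_chart : List (List String)) : Decidable (Pre_rel_chart_to_aldep_matrix rel_chart) := by unfold Pre_rel_chart_to_aldep_matrix; infer_instance
def pvWitness_rel_chart_to_aldep_matrix : List (List String) := [["-", "A"], ["E", "-"]]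
def Spec_rel_chart_to_aldep_matrix (rel_chart : List (List String)) (out : List (List String)) : Prop := out = rel_chart_to_aldep_matrix_alt rel_chart
instance (rel_chart : List (List String)) (out : List (List String)) : Decidable (Spec_rel_chart_to_aldep_matrix rel_chart out) := by unfold Spec_rel_chart_to_aldep_matrix; infer_instance

-- ===== CLAIM (what is proved, stated in full; the proofs are below) =====
def Claim_equal_rel_chart_to_aldep_matrix : Prop := ∀ (rel_chart : List (List String)), Dom_rel_chart_to_aldep_matrix rel_chart → Pre_rel_chart_to_aldep_matrix rel_chart → Spec_rel_chart_to_aldep_matrix rel_chart (rel_chart_to_aldep_matrix rel_chart)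

-- ===== LEMMAS AND PROOFS =====

-- A's nested append-fold is the index-matrix of if-expressions.
lemma portA_eq (rel_chart : List (List String)) :
    rel_chart_to_aldep_matrix rel_chart =
      (List.range rel_chart.length).map (fun i =>
        (List.range rel_chart.length).map (fun j =>
          if i ≠ j then (rel_chart.getD i []).getD j "" else "U")) := by
  unfold rel_chart_to_aldep_matrix
  rw [PySem.List.foldl_append_singleton_eq_map]
  simp only [List.nil_append]
  rw [PySem.List.pyRange_one]
  simp only [List.map_map, zero_add, Int.sub_zero, Int.toNat_natCast]
  apply List.map_congr_left
  intro i hi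
  simp only [Function.comp_apply]
  rw [PySem.List.foldl_append_singleton_eq_map]
  simp only [List.nil_append, List.map_map]
  apply List.map_congr_left
  intro j hj
  simp only [Function.comp_apply]
  simp only [List.mem_range] at hi hj
  by_cases h : i = j
  · simp [h]
  · have : (i:Int) ≠ (j:Int) := by exact_mod_cast h
    simp [h, this, PySem.List.pyGetD_natCast]

-- enumerate as a map over zipIdx.
lemma enumerate_map_eq {α β : Type} (xs : List α) (s : Int) (f : Int × α → β) :
    (PySem.List.enumerate xs s).map f = xs.zipIdx.map (fun p => f (s + p.2, p.1)) := by
  induction xs generalizing s with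
  | nil => simp [PySem.List.enumerate_nil]
  | cons x xs ih =>
      rw [PySem.List.enumerate_cons, List.map_cons, ih, List.zipIdx_cons, List.map_cons,
        List.zipIdx_succ, List.map_map]
      congr 1
      · simp
      · apply List.map_congr_left
        intro p _
        congr 1
        push_cast
        ring_nf

-- B's spliced row equals A's per-cell conditional row, under the row-length precondition.
lemma row_eq (row : List String) (n i : ℕ) (hi : i < n)
    (hrow : (if i + 1 = n then n - 1 else n) ≤ row.length) :
    row.take i ++ ["U"] ++ (row.drop (i + 1)).take (n - (i + 1)) =
      (List.range n).map (fun j => if i ≠ j then row.getD j "" else "U") := by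
  have hlen : n - 1 ≤ row.length := by split_ifs at hrow with h <;> omega
  have hi_le : i ≤ row.length := by omega
  have hfull : i + 1 < n → n ≤ row.length := by
    intro h; have : ¬ (i + 1 = n) := by omega
    simpa [this] using hrow
  apply List.ext_getElem
  · simp only [List.length_append, List.length_take, List.length_drop,
      List.length_map, List.length_range, List.length_cons, List.length_nil]
    by_cases h : i + 1 < n
    · have := hfull h; omega
    · omega
  · intro k hk1 hk2
    have hkn : k < n := by simpa using hk2
    simp only [List.getElem_map, List.getElem_range]
    rcases lt_trichotomy k i with h | h | h
    · rw [List.getElem_append_left (by simp ; omega), List.getElem_append_left (by simp ; omega),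
        List.getElem_take]
      have : i ≠ k := by omega
      rw [if_pos this, List.getD_eq_getElem _ _ (by omega)]
    · subst h
      rw [List.getElem_append_left (by simp ; omega),
        List.getElem_append_right (by simp)]
      simp [hi_le]
    · have hkr : k < row.length := by have := hfull (by omega); omega
      rw [List.getElem_append_right (by simp ; omega)]
      have hlt : i + 1 ≤ row.length := by omega
      simp only [List.length_append, List.length_take, List.getElem_take, List.getElem_drop,
        List.length_cons, List.length_nil]
      have : i ≠ k := by omega
      rw [if_pos this, List.getD_eq_getElem _ _ hkr]
      congr 1
      omega

theorem rel_chart_to_aldep_matrix_eq (rel_chart : List (List String))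
    (hpre : Pre_rel_chart_to_aldep_matrix rel_chart) :
    rel_chart_to_aldep_matrix rel_chart = rel_chart_to_aldep_matrix_alt rel_chart := by
  unfold rel_chart_to_aldep_matrix_alt
  rw [portA_eq, enumerate_map_eq]
  apply List.ext_getElem
  · simp
  · intro k h1 h2
    have hk : k < rel_chart.length := by simpa using h1
    simp only [List.getElem_map, List.getElem_range, List.getElem_zipIdx, zero_add]
    have hrow := hpre k hk
    rw [List.getD_eq_getElem _ _ hk] at hrow
    rw [List.getD_eq_getElem _ _ hk]
    rw [← row_eq (rel_chart[k]) rel_chart.length k hk hrow]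
    congr 1
    · congr 1
      rw [PySem.List.slice_to_natCast]
    · rw [show ((k : Int) + 1) = ((k + 1 : ℕ) : Int) by push_cast; ring,
        PySem.List.slice_natCast]

-- ===== VERDICT (by name: the statement is the Claim_ definition above) =====
theorem rel_chart_to_aldep_matrix_spec : Claim_equal_rel_chart_to_aldep_matrix := by
  intro rc _ hpre
  exact rel_chart_to_aldep_matrix_eq rc hpre
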